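-- pv_equiv track=rewrite | github.com/AnkitKolte47/End-to-End-IndiaMart-Scraping-Visualization-Project | indiamart_scrapper.py | count_companies_by_city
-- ===== SOURCE A (Python) =====
-- def count_companies_by_city(cleaned_data):
--     """Returns unique company counts per city."""
--     city_map = {}
--     for d in cleaned_data:
--         city = d["city"]
--         company = d["company"]
--         if city not in city_map:
--             city_map[city] = set()
--         city_map[city].add(company)
--     return {city: len(companies) for city, companies in city_map.items()}
-- ===== SOURCE B (Python) =====
-- def count_companies_by_city(cleaned_data):
--     """Returns unique company counts per city.
--
--     First-occurrence scan: a record is counted for its city exactly when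
--     its (city, company) pair has not appeared earlier in the list, decided
--     by a membership scan of the already-seen prefix (no set/dict-of-sets
--     grouping structure at all)."""
--     pairs = [(d["city"], d["company"]) for d in cleaned_data]
--     counts = {}
--     for i, (city, company) in enumerate(pairs):
--         if (city, company) not in pairs[:i]:
--             counts[city] = counts.get(city, 0) + 1
--     return counts
-- ===== Notes on version B (the rewrite author's own statement) =====
-- stated objective: alternative
-- what changed: replaces A's hash-based dict-of-sets grouping (a set of companies per city, then set sizes) with a first-occurrence prefix-scan: each record is tallied for its city iff its (city, company) pair does not occur earlier in the list, decided by a linear scan of the prefix -- no per-city sets and no hash deduplication, at the price of quadratic time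
import Mathlib
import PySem

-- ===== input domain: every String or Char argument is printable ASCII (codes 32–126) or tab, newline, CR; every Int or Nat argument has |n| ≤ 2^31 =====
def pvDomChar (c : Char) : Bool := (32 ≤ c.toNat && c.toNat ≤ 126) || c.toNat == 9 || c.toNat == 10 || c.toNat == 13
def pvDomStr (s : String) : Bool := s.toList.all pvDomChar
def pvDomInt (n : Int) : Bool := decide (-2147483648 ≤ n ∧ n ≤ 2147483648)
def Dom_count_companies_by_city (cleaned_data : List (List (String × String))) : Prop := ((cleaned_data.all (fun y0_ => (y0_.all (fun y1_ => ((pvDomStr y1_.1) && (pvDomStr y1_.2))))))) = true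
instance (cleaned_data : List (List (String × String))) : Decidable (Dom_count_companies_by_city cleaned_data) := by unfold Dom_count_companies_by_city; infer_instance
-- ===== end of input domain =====

-- B replaces A's dict-of-sets grouping by a first-occurrence prefix scan:
-- a record is tallied for its city iff its (city, company) pair does not
-- occur earlier in the list, decided by scanning the prefix (no per-city
-- sets; alternative decomposition, quadratic instead of linear time).
-- Pre_ excludes inputs where some record lacks a "city" or "company" key
-- (Python A raises KeyError there, and so does B).

-- ===== PORT A =====
def count_companies_by_city (cleaned_data : List (List (String × String))) : List (String × Int) :=
  let city_map : PySem.Dict String (PySem.Set String) :=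
    cleaned_data.foldl (fun m d =>
      let city := (PySem.Dict.mk d).getD "city" ""
      let company := (PySem.Dict.mk d).getD "company" ""
      let m' := if m.contains city then m else m.insert city PySem.Set.empty
      m'.modify city PySem.Set.empty (fun s => PySem.Set.add s company)) PySem.Dict.empty
  city_map.items.map (fun p => (p.1, (PySem.Set.len p.2 : Int)))

-- ===== PORT B =====
-- for i, (city, company) in enumerate(pairs): if (city, company) not in pairs[:i]: counts[city] += 1
def count_companies_by_city_alt (cleaned_data : List (List (String × String))) : List (String × Int) :=
  let pairs : List (String × String) :=
    cleaned_data.map (fun d =>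
      ((PySem.Dict.mk d).getD "city" "", (PySem.Dict.mk d).getD "company" ""))
  let counts : PySem.Dict String Int :=
    (PySem.List.enumerate pairs 0).foldl (fun c ip =>
      if (PySem.List.slice pairs none (some ip.1)).contains ip.2 then c
      else c.insert ip.2.1 (c.getD ip.2.1 0 + 1)) PySem.Dict.empty
  counts.items

-- ===== PRECONDITION & SPEC =====
-- Pre_ : every record has both keys; on a record missing "city" or "company"
-- the Python A (and B alike) raises KeyError.
def Pre_count_companies_by_city (cleaned_data : List (List (String × String))) : Prop :=
  ∀ d ∈ cleaned_data, (PySem.Dict.mk d).contains "city" = true ∧ (PySem.Dict.mk d).contains "company" = true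
instance (cleaned_data : List (List (String × String))) : Decidable (Pre_count_companies_by_city cleaned_data) := by
  unfold Pre_count_companies_by_city; infer_instance

def pvWitness_count_companies_by_city : (List (List (String × String))) :=
  [[("city", "Pune"), ("company", "Acme")], [("city", "Pune"), ("company", "Zeta")]]

def Spec_count_companies_by_city (cleaned_data : List (List (String × String))) (out : List (String × Int)) : Prop := out = count_companies_by_city_alt cleaned_data
instance (cleaned_data : List (List (String × String))) (out : List (String × Int)) : Decidable (Spec_count_companies_by_city cleaned_data out) := by unfold Spec_count_companies_by_city; infer_instance

-- ===== CLAIM (what is proved, stated in full; the proofs are below) =====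
def Claim_equal_count_companies_by_city : Prop := ∀ (cleaned_data : List (List (String × String))), Dom_count_companies_by_city cleaned_data → Pre_count_companies_by_city cleaned_data → Spec_count_companies_by_city cleaned_data (count_companies_by_city cleaned_data)

-- ===== LEMMAS AND PROOFS =====

theorem stepA_eq (m : PySem.Dict String (PySem.Set String)) (p : String × String) :
    (let m' := if m.contains p.1 then m else m.insert p.1 PySem.Set.empty
     m'.modify p.1 PySem.Set.empty (fun s => PySem.Set.add s p.2))
    = m.insert p.1 (PySem.Set.add (m.getD p.1 PySem.Set.empty) p.2) := by
  by_cases h : m.contains p.1 = true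
  · simp [h, PySem.Dict.modify]
  · simp [h, PySem.Dict.modify, PySem.Dict.getD_insert_self, PySem.Dict.insert_insert_self,
      PySem.Dict.getD_of_not_contains, PySem.Set.add, PySem.Set.empty]

theorem ofList_map_ofList {α β : Type} [BEq α] [LawfulBEq α] [BEq β] [LawfulBEq β] (f : α → β) (ps : List α) :
    PySem.Set.ofList ((PySem.Set.ofList ps).map f) = PySem.Set.ofList (ps.map f) := by
  induction ps using List.reverseRecOn with
  | nil => rfl
  | append_singleton qs p ih =>
    by_cases hp : p ∈ qs
    · have h1 : PySem.Set.ofList (qs ++ [p]) = PySem.Set.ofList qs := by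
        rw [PySem.Set.ofList_append_singleton, PySem.Set.add_of_mem (by simp [PySem.Set.mem_ofList, hp])]
      rw [h1, ih, List.map_append]
      simp only [List.map_cons, List.map_nil]
      rw [PySem.Set.ofList_append_singleton,
        PySem.Set.add_of_mem (by rw [PySem.Set.mem_ofList]; exact List.mem_map_of_mem hp)]
    · rw [PySem.Set.ofList_append_singleton, PySem.Set.add_of_not_mem (by simp [PySem.Set.mem_ofList, hp]),
        List.map_append, List.map_append]
      simp only [List.map_cons, List.map_nil]
      rw [PySem.Set.ofList_append_singleton, PySem.Set.ofList_append_singleton, ih]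

theorem groupA_items (ps : List (String × String)) :
    (ps.foldl (fun m p => m.insert p.1 (PySem.Set.add (m.getD p.1 PySem.Set.empty) p.2)) PySem.Dict.empty).items
    = (PySem.Set.ofList (ps.map Prod.fst)).map
        (fun c => (c, PySem.Set.ofList ((ps.filter (fun q => q.1 == c)).map Prod.snd))) := by
  induction ps using List.reverseRecOn with
  | nil => rfl
  | append_singleton qs p ih =>
    rw [List.foldl_append]
    simp only [List.foldl_cons, List.foldl_nil]
    set prev := qs.foldl (fun m p => m.insert p.1 (PySem.Set.add (m.getD p.1 PySem.Set.empty) p.2)) PySem.Dict.empty with hprev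
    have hkeys : prev.keys = PySem.Set.ofList (qs.map Prod.fst) := by
      show prev.items.map Prod.fst = _
      rw [ih, List.map_map]
      simp [Function.comp_def]
    have hnd : prev.keys.Nodup := by rw [hkeys]; exact PySem.Set.nodup_ofList (List.map Prod.fst qs)
    by_cases hp : p.1 ∈ qs.map Prod.fst
    · have hc : prev.contains p.1 = true := by
        rw [PySem.Dict.contains_eq_decide_mem_keys, hkeys]
        simp [PySem.Set.mem_ofList, hp]
      have hmem : (p.1, PySem.Set.ofList ((qs.filter (fun q => q.1 == p.1)).map Prod.snd)) ∈ prev.items := by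
        rw [ih]
        exact List.mem_map_of_mem (by rw [PySem.Set.mem_ofList]; exact hp)
      have hgetD : prev.getD p.1 PySem.Set.empty
          = PySem.Set.ofList ((qs.filter (fun q => q.1 == p.1)).map Prod.snd) :=
        PySem.Dict.getD_of_mem_items prev hmem hnd _
      rw [PySem.Dict.items_insert_of_contains prev _ hc, ih, hgetD]
      have hcity : PySem.Set.ofList ((qs ++ [p]).map Prod.fst) = PySem.Set.ofList (qs.map Prod.fst) := by
        rw [List.map_append]
        simp only [List.map_cons, List.map_nil]
        rw [PySem.Set.ofList_append_singleton, PySem.Set.add_of_mem (by rw [PySem.Set.mem_ofList]; exact hp)]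
      rw [hcity, List.map_map]
      refine List.map_congr_left (fun c hcmem => ?_)
      by_cases hce : c = p.1
      · subst hce
        simp only [Function.comp, beq_self_eq_true, if_true]
        rw [List.filter_append]
        simp only [List.filter_cons, List.filter_nil, beq_self_eq_true, if_true]
        rw [List.map_append]
        simp only [List.map_cons, List.map_nil]
        rw [PySem.Set.ofList_append_singleton]
      · have : (c == p.1) = false := beq_false_of_ne hce
        simp only [Function.comp, this]
        rw [List.filter_append]
        simp only [List.filter_cons, List.filter_nil]
        have : (p.1 == c) = false := beq_false_of_ne (fun h => hce h.symm)
        simp [this]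
    · have hc : prev.contains p.1 = false := by
        rw [PySem.Dict.contains_eq_decide_mem_keys, hkeys]
        simp [PySem.Set.mem_ofList, hp]
      have hgetD : prev.getD p.1 PySem.Set.empty = PySem.Set.empty :=
        PySem.Dict.getD_of_not_contains prev _ hc
      rw [PySem.Dict.items_insert_of_not_contains prev _ hc, ih, hgetD]
      have hcity : PySem.Set.ofList ((qs ++ [p]).map Prod.fst)
          = PySem.Set.ofList (qs.map Prod.fst) ++ [p.1] := by
        rw [List.map_append]
        simp only [List.map_cons, List.map_nil]
        rw [PySem.Set.ofList_append_singleton, PySem.Set.add_of_not_mem (by rw [PySem.Set.mem_ofList]; exact hp)]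
      rw [hcity, List.map_append]
      congr 1
      · refine List.map_congr_left (fun c hcmem => ?_)
        have hcne : c ≠ p.1 := by
          rw [PySem.Set.mem_ofList] at hcmem
          exact fun h => hp (h ▸ hcmem)
        rw [List.filter_append]
        simp only [List.filter_cons, List.filter_nil]
        have : (p.1 == c) = false := beq_false_of_ne (fun h => hcne h.symm)
        simp [this]
      · simp only [List.map_cons, List.map_nil]
        have hfe : qs.filter (fun q => q.1 == p.1) = [] := by
          rw [List.filter_eq_nil_iff]
          intro q hq hbe
          have : q.1 = p.1 := by rwa [beq_iff_eq] at hbe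
          exact hp (this ▸ List.mem_map_of_mem hq)
        rw [List.filter_append, hfe]
        simp [PySem.Set.add, PySem.Set.empty, PySem.Set.ofList]

theorem ofList_filter_snd (c : String) (ps : List (String × String)) :
    PySem.Set.ofList ((ps.filter (fun q => q.1 == c)).map Prod.snd)
    = ((PySem.Set.ofList ps).filter (fun q => q.1 == c)).map Prod.snd := by
  induction ps using List.reverseRecOn with
  | nil => rfl
  | append_singleton qs p ih =>
    rw [List.filter_append, PySem.Set.ofList_append_singleton]
    by_cases hF : (p.1 == c) = true
    · simp only [List.filter_cons, List.filter_nil, hF, if_true]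
      rw [List.map_append]
      simp only [List.map_cons, List.map_nil]
      rw [PySem.Set.ofList_append_singleton]
      by_cases hp : p ∈ qs
      · rw [PySem.Set.add_of_mem (x := p) (by rw [PySem.Set.mem_ofList]; exact hp)]
        rw [PySem.Set.add_of_mem (by
          rw [ih]
          exact List.mem_map_of_mem (List.mem_filter.mpr ⟨(PySem.Set.mem_ofList _ _).mpr hp, hF⟩)), ih]
      · rw [PySem.Set.add_of_not_mem (x := p) (by rw [PySem.Set.mem_ofList]; exact hp)]
        have hp2 : p.2 ∉ PySem.Set.ofList ((qs.filter (fun q => q.1 == c)).map Prod.snd) := by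
          rw [PySem.Set.mem_ofList]
          intro hmem
          obtain ⟨q, hq, hq2⟩ := List.mem_map.mp hmem
          have hq' := List.mem_filter.mp hq
          have hq2' := hq'.2
          have h1 : q.1 = c := by rwa [beq_iff_eq] at hq2'
          have h2 : p.1 = c := by rwa [beq_iff_eq] at hF
          have : q = p := Prod.ext (h1.trans h2.symm) hq2
          exact hp (this ▸ hq'.1)
        rw [PySem.Set.add_of_not_mem hp2, ih, List.filter_append]
        simp [hF]
    · have hF' : (p.1 == c) = false := Bool.eq_false_iff.mpr hF
      simp only [List.filter_cons, List.filter_nil, hF']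
      simp only [Bool.false_eq_true, if_false, List.append_nil]
      rw [ih]
      by_cases hp : p ∈ qs
      · rw [PySem.Set.add_of_mem (by rw [PySem.Set.mem_ofList]; exact hp)]
      · rw [PySem.Set.add_of_not_mem (by rw [PySem.Set.mem_ofList]; exact hp), List.filter_append]
        simp [hF']

-- B's first-occurrence prefix-scan fold equals the fold of the counting step
-- over the ordered dedup (PySem.Set.ofList) of the pairs.
theorem enumFold_eq_ofList_fold (ps : List (String × String)) (init : PySem.Dict String Int) :
    (PySem.List.enumerate ps 0).foldl (fun c ip =>
        if (PySem.List.slice ps none (some ip.1)).contains ip.2 then c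
        else c.insert ip.2.1 (c.getD ip.2.1 0 + 1)) init
    = (PySem.Set.ofList ps).foldl (fun c p => c.insert p.1 (c.getD p.1 0 + 1)) init := by
  induction ps using List.reverseRecOn generalizing init with
  | nil => rfl
  | append_singleton qs p ih =>
    rw [PySem.List.enumerate_append, List.foldl_append]
    simp only [PySem.List.enumerate_cons, PySem.List.enumerate_nil, List.foldl_cons, List.foldl_nil]
    have hprefix : ∀ (c : PySem.Dict String Int) (ip : Int × (String × String)), ip ∈ PySem.List.enumerate qs 0 →
        (fun c ip => if (PySem.List.slice (qs ++ [p]) none (some ip.1)).contains ip.2 then c else c.insert ip.2.1 (c.getD ip.2.1 0 + 1)) c ip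
        = (fun c ip => if (PySem.List.slice qs none (some ip.1)).contains ip.2 then c else c.insert ip.2.1 (c.getD ip.2.1 0 + 1)) c ip := by
      intro c ip hmem
      rw [PySem.List.mem_enumerate_iff] at hmem
      obtain ⟨k, hk, hip⟩ := hmem
      subst hip
      simp only [zero_add]
      rw [PySem.List.slice_to_natCast, PySem.List.slice_to_natCast,
        List.take_append_of_le_length (le_of_lt hk)]
    rw [PySem.List.foldl_congr_mem (PySem.List.enumerate qs 0) _ _ init hprefix, ih]
    have hlen : (0 + (qs.length : Int)) = ((qs.length : Nat) : Int) := by omega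
    rw [hlen, PySem.List.slice_to_natCast, List.take_left]
    rw [PySem.Set.ofList_append_singleton]
    by_cases hp : p ∈ qs
    · rw [PySem.Set.add_of_mem (by rw [PySem.Set.mem_ofList]; exact hp)]
      simp [hp]
    · rw [PySem.Set.add_of_not_mem (by rw [PySem.Set.mem_ofList]; exact hp), List.foldl_append]
      simp [hp]

-- The two ports compute the same association list.
theorem ports_agree (cd : List (List (String × String))) :
    count_companies_by_city cd = count_companies_by_city_alt cd := by
  unfold count_companies_by_city count_companies_by_city_alt
  set pairF : List (String × String) → String × String :=
    fun d => ((PySem.Dict.mk d).getD "city" "", (PySem.Dict.mk d).getD "company" "") with hpairF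
  set ps : List (String × String) := cd.map pairF with hps
  -- A's fold over records = fold over the extracted pairs
  have hA : cd.foldl (fun m d =>
      let city := (PySem.Dict.mk d).getD "city" ""
      let company := (PySem.Dict.mk d).getD "company" ""
      let m' := if m.contains city then m else m.insert city PySem.Set.empty
      m'.modify city PySem.Set.empty (fun s => PySem.Set.add s company)) PySem.Dict.empty
      = ps.foldl (fun m p => m.insert p.1 (PySem.Set.add (m.getD p.1 PySem.Set.empty) p.2)) PySem.Dict.empty := by
    rw [hps, List.foldl_map]
    congr 1
    funext m d
    exact stepA_eq m (pairF d)
  simp only [hA, groupA_items, List.map_map]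
  -- B's prefix-scan fold = fold over the dedup = Counter over the city column
  rw [enumFold_eq_ofList_fold ps PySem.Dict.empty]
  have hB : (PySem.Set.ofList ps).foldl (fun c p => c.insert p.1 (c.getD p.1 0 + 1)) PySem.Dict.empty
      = PySem.Dict.counter ((PySem.Set.ofList ps).map Prod.fst) := by
    rw [← PySem.Dict.foldl_insert_getD_add_one_eq_counter, List.foldl_map]
  rw [hB, PySem.Dict.items_counter, ofList_map_ofList]
  refine List.map_congr_left (fun c hc => ?_)
  simp only [Function.comp_def]
  congr 1
  rw [ofList_filter_snd]
  simp only [PySem.Set.len]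
  rw [List.length_map, List.count_eq_countP, List.countP_map]
  simp [List.countP_eq_length_filter, Function.comp_def]

-- ===== VERDICT (by name: the statement is the Claim_ definition above) =====
theorem count_companies_by_city_spec : Claim_equal_count_companies_by_city := by
  intro cleaned_data _ _
  unfold Spec_count_companies_by_city
  exact ports_agree cleaned_data
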